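-- pv_equiv track=rewrite | github.com/Cineg/Advent-of-Code | Day 11 - Cosmic Expansion/expansion.py | _update_cosmic_map
-- ===== SOURCE A (Python) =====
-- def _update_cosmic_map(cosmic_map: list[list[str]]) -> list[list[str]]:
--     temp_arr: list[list[str]] = []
--     is_galaxy: bool = False
--     # add rows
--     for row in cosmic_map:
--         is_galaxy = False
--         for item in row:
--             if item == "#":
--                 is_galaxy = True
--                 break
--
--         if not is_galaxy:
--             i: int = 0
--             while i < len(row):
--                 row[i] = "X"
--                 i += 1
--
--         temp_arr.append(row)
--
--     # add columns
--     column: int = 0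
--     while column < len(temp_arr[0]):
--         is_galaxy = False
--         for row in temp_arr:
--             if row[column] == "#":
--                 is_galaxy = True
--                 break
--
--         if not is_galaxy:
--             i: int = 0
--             while i < len(temp_arr):
--                 temp_arr[i][column] = "X"
--                 i += 1
--
--         column += 1
--
--     return temp_arr
-- ===== SOURCE B (Python) =====
-- def _update_cosmic_map(cosmic_map: list[list[str]]) -> list[list[str]]:
--     width = len(cosmic_map[0])
--     empty_cols = [all(row[c] != "#" for row in cosmic_map) for c in range(width)]
--     for row in cosmic_map:
--         empty_row = "#" not in row
--         for c in range(len(row)):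
--             if empty_row or (c < width and empty_cols[c]):
--                 row[c] = "X"
--     return cosmic_map
-- ===== Notes on version B (the rewrite author's own statement) =====
-- stated objective: simpler
-- what changed: A interleaves marking with detection (mark empty rows, then re-scan the mutated grid column by column, marking each empty column as it goes); B separates the phases: it first computes width and the empty-column flags from the untouched grid, then does one marking pass over every cell. Both mutate the argument in place; equivalence of return values is proved.
import Mathlib
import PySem

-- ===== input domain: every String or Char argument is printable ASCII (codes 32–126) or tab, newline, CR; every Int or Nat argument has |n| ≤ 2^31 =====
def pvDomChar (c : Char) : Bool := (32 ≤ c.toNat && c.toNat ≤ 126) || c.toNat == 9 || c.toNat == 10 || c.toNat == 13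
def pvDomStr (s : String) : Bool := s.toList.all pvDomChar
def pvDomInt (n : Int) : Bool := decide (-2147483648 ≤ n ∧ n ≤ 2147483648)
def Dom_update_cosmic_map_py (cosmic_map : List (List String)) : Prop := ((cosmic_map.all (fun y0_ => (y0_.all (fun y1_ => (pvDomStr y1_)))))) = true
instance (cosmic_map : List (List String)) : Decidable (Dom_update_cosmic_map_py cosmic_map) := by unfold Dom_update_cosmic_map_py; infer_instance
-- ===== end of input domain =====

-- B separates detection from marking (empty-row/empty-column flags computed on the untouched
-- grid, then one marking pass), replacing A's interleaved mark-then-rescan; objective: simpler.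
-- Python A and B both mutate the argument's rows in place; the equivalence proved here is about
-- the returned value (which is that same grid).

-- ===== PORT A =====
-- inner 'for item in row: if item == "#": break' loop
def pvA_rowHasHash : List String → Bool
  | [] => false
  | x :: xs => if x == "#" then true else pvA_rowHasHash xs

-- 'while i < len(row): row[i] = "X"' loop
def pvA_markRow : List String → List String
  | [] => []
  | _ :: xs => "X" :: pvA_markRow xs

-- 'for row in temp_arr: if row[column] == "#": break' loop (out-of-range getD is harmless:
-- Python raises there and such inputs are excluded by Pre_)
def pvA_colHasHash : List (List String) → Nat → Bool
  | [], _ => false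
  | row :: rest, c => if row.getD c "" == "#" then true else pvA_colHasHash rest c

-- 'while i < len(temp_arr): temp_arr[i][column] = "X"' loop
def pvA_markCol (arr : List (List String)) (c : Nat) : List (List String) :=
  arr.map (fun row => row.set c "X")

-- 'while column < len(temp_arr[0])' loop, fuel = number of remaining columns
def pvA_colStep : List (List String) → Nat → Nat → List (List String)
  | arr, _, 0 => arr
  | arr, c, n + 1 =>
      pvA_colStep (if pvA_colHasHash arr c then arr else pvA_markCol arr c) (c + 1) n

def update_cosmic_map_py (cosmic_map : List (List String)) : List (List String) :=
  let temp_arr := cosmic_map.map (fun row => if pvA_rowHasHash row then row else pvA_markRow row)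
  pvA_colStep temp_arr 0 (temp_arr.headD []).length

-- ===== PORT B =====
def update_cosmic_map_py_alt (cosmic_map : List (List String)) : List (List String) :=
  let width := (cosmic_map.headD []).length
  let emptyCols := (List.range width).map
      (fun c => cosmic_map.all (fun row => !(row.getD c "" == "#")))
  cosmic_map.map (fun row =>
    let emptyRow := !(row.contains "#")
    row.zipIdx.map (fun p =>
      if emptyRow || (decide (p.2 < width) && emptyCols.getD p.2 false) then "X" else p.1))

-- ===== PRECONDITION & SPEC =====
-- Pre_ excludes exactly the inputs on which Python A raises IndexError: the empty map
-- (cosmic_map[0]) and ragged maps where the column scan reaches an index past a short row's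
-- end before any earlier row shows '#' in that column (the scan breaks at the first '#').
def Pre_update_cosmic_map_py (cosmic_map : List (List String)) : Prop :=
  cosmic_map ≠ [] ∧
  ∀ c < (cosmic_map.headD []).length, ∀ i < cosmic_map.length,
    (∀ j < i, ¬((cosmic_map.getD j []).getD c "" = "#")) → c < (cosmic_map.getD i []).length
instance (cosmic_map : List (List String)) : Decidable (Pre_update_cosmic_map_py cosmic_map) := by
  unfold Pre_update_cosmic_map_py; infer_instance

def pvWitness_update_cosmic_map_py : List (List String) := [[".", "#"], [".", "."]]

def Spec_update_cosmic_map_py (cosmic_map : List (List String)) (out : List (List String)) : Prop := out = update_cosmic_map_py_alt cosmic_map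
instance (cosmic_map : List (List String)) (out : List (List String)) : Decidable (Spec_update_cosmic_map_py cosmic_map out) := by unfold Spec_update_cosmic_map_py; infer_instance

-- ===== CLAIM (what is proved, stated in full; the proofs are below) =====
def Claim_equal_update_cosmic_map_py : Prop := ∀ (cosmic_map : List (List String)), Dom_update_cosmic_map_py cosmic_map → Pre_update_cosmic_map_py cosmic_map → Spec_update_cosmic_map_py cosmic_map (update_cosmic_map_py cosmic_map)

-- ===== LEMMAS AND PROOFS =====

-- row transform of A's first phase
def pvF (row : List String) : List String :=
  if pvA_rowHasHash row then row else pvA_markRow row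

-- column c of the transformed grid contains '#'
def pvE (m : List (List String)) (c : Nat) : Bool :=
  pvA_colHasHash (m.map pvF) c

-- per-row effect of A's column loop, with the (invariant) column flags E
def pvG (E : Nat → Bool) : Nat → Nat → List String → List String
  | _, 0, row => row
  | c, n + 1, row => pvG E (c + 1) n (if E c then row else row.set c "X")

theorem pvA_markRow_eq (row : List String) : pvA_markRow row = row.map (fun _ => "X") := by
  induction row with
  | nil => rfl
  | cons x xs ih => simp [pvA_markRow, ih]

theorem pvF_length (row : List String) : (pvF row).length = row.length := by
  unfold pvF; split <;> simp [pvA_markRow_eq]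

theorem pvA_rowHasHash_any (row : List String) : pvA_rowHasHash row = row.any (· == "#") := by
  induction row with
  | nil => rfl
  | cons x xs ih =>
    rw [pvA_rowHasHash, List.any_cons]
    cases hx : (x == "#")
    · rw [if_neg (show ¬(false = true) from Bool.false_ne_true), Bool.false_or, ih]
    · rw [if_pos rfl, Bool.true_or]

theorem pvA_rowHasHash_eq (row : List String) : pvA_rowHasHash row = row.contains "#" := by
  rw [pvA_rowHasHash_any, List.any_beq']

theorem pvA_colHasHash_eq (arr : List (List String)) (c : Nat) :
    pvA_colHasHash arr c = arr.any (fun row => row.getD c "" == "#") := by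
  induction arr with
  | nil => rfl
  | cons r rs ih =>
    rw [pvA_colHasHash, List.any_cons]
    cases hr : (r.getD c "" == "#")
    · rw [if_neg (show ¬(false = true) from Bool.false_ne_true), Bool.false_or, ih]
    · rw [if_pos rfl, Bool.true_or]

theorem pvF_getD_hash (row : List String) (c : Nat) :
    ((pvF row).getD c "" == "#") = (row.getD c "" == "#") := by
  by_cases h : pvA_rowHasHash row
  · rw [pvF, if_pos h]
  · have hall : ∀ x ∈ row, ¬(x = "#") := by
      have hany : row.any (· == "#") = false := by
        rw [← pvA_rowHasHash_any, Bool.eq_false_iff]; exact h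
      simpa using hany
    rw [pvF, if_neg h, pvA_markRow_eq]
    rcases Nat.lt_or_ge c row.length with hc | hc
    · have hx := hall row[c] (List.getElem_mem hc)
      simp [List.getD_eq_getElem?_getD, hc, hx]
    · simp [List.getD_eq_getElem?_getD, Nat.not_lt.mpr hc]

theorem pvE_eq (m : List (List String)) (c : Nat) :
    pvE m c = m.any (fun row => row.getD c "" == "#") := by
  rw [pvE, pvA_colHasHash_eq, List.any_map]
  congr 1
  funext row
  exact pvF_getD_hash row c

theorem pvA_colHasHash_markCol_self (arr : List (List String)) (c : Nat) :
    pvA_colHasHash (pvA_markCol arr c) c = false := by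
  rw [pvA_markCol, pvA_colHasHash_eq, List.any_map]
  simp only [List.any_eq_false]
  intro row _
  rcases Nat.lt_or_ge c row.length with hc | hc
  · simp [List.getD_eq_getElem?_getD, hc]
  · simp [List.getD_eq_getElem?_getD, Nat.not_lt.mpr hc]

theorem pvA_colHasHash_markCol_ne (arr : List (List String)) {c c' : Nat} (h : c' ≠ c) :
    pvA_colHasHash (pvA_markCol arr c) c' = pvA_colHasHash arr c' := by
  rw [pvA_markCol, pvA_colHasHash_eq, List.any_map, pvA_colHasHash_eq]
  congr 1
  funext row
  simp [Function.comp, List.getD_eq_getElem?_getD, Ne.symm h]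

theorem pvA_colStep_eq_map (E : Nat → Bool) :
    ∀ (n c : Nat) (arr : List (List String)),
      (∀ c', pvA_colHasHash arr c' = E c') →
      pvA_colStep arr c n = arr.map (pvG E c n) := by
  intro n
  induction n with
  | zero => intro c arr _; simp [pvA_colStep, pvG]
  | succ k ih =>
    intro c arr hinv
    rw [pvA_colStep]
    have hinv' : ∀ c'',
        pvA_colHasHash (if pvA_colHasHash arr c then arr else pvA_markCol arr c) c'' = E c'' := by
      intro c''
      by_cases hc : pvA_colHasHash arr c
      · rw [if_pos hc]; exact hinv c''
      · rw [if_neg hc]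
        by_cases hcc : c'' = c
        · subst hcc
          rw [pvA_colHasHash_markCol_self, ← hinv c'']
          rw [Bool.not_eq_true] at hc
          exact hc.symm
        · rw [pvA_colHasHash_markCol_ne arr hcc, hinv c'']
    rw [ih (c + 1) _ hinv']
    by_cases hEc : E c
    · rw [if_pos ((hinv c).trans hEc)]
      refine List.map_congr_left (fun row _ => ?_)
      rw [pvG, if_pos hEc]
    · have hcf : ¬ pvA_colHasHash arr c = true := by rw [hinv c]; exact hEc
      rw [if_neg hcf, pvA_markCol, List.map_map]
      refine List.map_congr_left (fun row _ => ?_)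
      rw [Function.comp_apply, pvG, if_neg hEc]

theorem pvG_getElem? (E : Nat → Bool) :
    ∀ (n c : Nat) (row : List String) (i : Nat),
      (pvG E c n row)[i]? =
        if c ≤ i ∧ i < c + n ∧ E i = false ∧ i < row.length then some "X" else row[i]? := by
  intro n
  induction n with
  | zero => intro c row i; rw [pvG, if_neg]; omega
  | succ k ih =>
    intro c row i
    rw [pvG, ih]
    by_cases hEc : E c
    · simp only [if_pos hEc]
      refine if_congr ?_ rfl rfl
      constructor
      · rintro ⟨h1, h2, h3, h4⟩; exact ⟨by omega, by omega, h3, h4⟩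
      · rintro ⟨h1, h2, h3, h4⟩
        have hne : c ≠ i := by rintro rfl; rw [hEc] at h3; cases h3
        exact ⟨by omega, by omega, h3, h4⟩
    · simp only [if_neg hEc, List.length_set]
      have hset : ∀ j : Nat, (row.set c "X")[j]? =
          if c = j then (if c < row.length then some "X" else none) else row[j]? :=
        fun j => List.getElem?_set
      by_cases hic : i = c
      · subst hic
        rw [if_neg (show ¬(i + 1 ≤ i ∧ i < i + 1 + k ∧ E i = false ∧ i < row.length)
            from fun h => by omega)]
        rw [hset i, if_pos rfl]
        rw [Bool.not_eq_true] at hEc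
        by_cases hlen : i < row.length
        · rw [if_pos hlen, if_pos ⟨Nat.le_refl i, by omega, hEc, hlen⟩]
        · rw [if_neg hlen,
            if_neg (show ¬(i ≤ i ∧ i < i + (k + 1) ∧ E i = false ∧ i < row.length)
              from fun h => hlen h.2.2.2),
            List.getElem?_eq_none (by omega)]
      · rw [hset i, if_neg (show ¬c = i from fun h => hic h.symm)]
        refine if_congr ?_ rfl rfl
        constructor
        · rintro ⟨h1, h2, h3, h4⟩; exact ⟨by omega, by omega, h3, h4⟩
        · rintro ⟨h1, h2, h3, h4⟩
          have hne : i ≠ c := hic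
          exact ⟨by omega, by omega, h3, h4⟩

theorem pvCols_getD (m : List (List String)) (c : Nat) :
    ((List.range (m.headD []).length).map
        (fun c => m.all (fun row => !(row.getD c "" == "#")))).getD c false
      = (decide (c < (m.headD []).length) && !(pvE m c)) := by
  rcases Nat.lt_or_ge c (m.headD []).length with hc | hc
  · rw [List.getD_eq_getElem?_getD, List.getElem?_map, List.getElem?_range hc,
      Option.map_some, Option.getD_some, pvE_eq, List.all_eq_not_any_not,
      decide_eq_true hc, Bool.true_and]
    congr 1
    congr 1
    funext row
    simp
  · rw [List.getD_eq_getElem?_getD, List.getElem?_eq_none (by simpa using hc),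
      Option.getD_none, decide_eq_false (Nat.not_lt.mpr hc), Bool.false_and]

theorem pvRow_eq (m : List (List String)) (row : List String) :
    pvG (pvE m) 0 ((m.headD []).length) (pvF row) =
      row.zipIdx.map (fun p =>
        if (!(row.contains "#")) || (decide (p.2 < (m.headD []).length) &&
            (((List.range (m.headD []).length).map
              (fun c => m.all (fun r => !(r.getD c "" == "#")))).getD p.2 false))
        then "X" else p.1) := by
  refine List.ext_getElem? (fun i => ?_)
  rw [pvG_getElem?, List.getElem?_map, List.getElem?_zipIdx, Option.map_map]
  rcases Nat.lt_or_ge i row.length with hi | hi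
  · rw [List.getElem?_eq_getElem hi, Option.map_some]
    simp only [Function.comp_apply, Nat.zero_add]
    rw [pvCols_getD, ← pvA_rowHasHash_eq]
    have hflen : i < (pvF row).length := by rw [pvF_length]; exact hi
    by_cases hcol : i < (m.headD []).length ∧ pvE m i = false
    · have ht : (decide (i < (m.headD []).length) && !pvE m i) = true := by
        rw [hcol.2, decide_eq_true hcol.1]; rfl
      rw [ht, Bool.and_true, decide_eq_true hcol.1, Bool.or_true, if_pos rfl,
        if_pos ⟨Nat.zero_le i, hcol.1, hcol.2, hflen⟩]
    · have hfalse : (decide (i < (m.headD []).length) && !pvE m i) = false := by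
        by_cases hiw : i < (m.headD []).length
        · have hE : pvE m i = true := by
            rcases Bool.eq_false_or_eq_true (pvE m i) with h | h
            · exact h
            · exact absurd ⟨hiw, h⟩ hcol
          rw [hE, Bool.not_true, Bool.and_false]
        · rw [decide_eq_false hiw, Bool.false_and]
      rw [hfalse, Bool.and_false, Bool.or_false,
        if_neg (show ¬(0 ≤ i ∧ i < (m.headD []).length ∧ pvE m i = false ∧
            i < (pvF row).length)
          from fun h => hcol ⟨h.2.1, h.2.2.1⟩)]
      cases hhb : pvA_rowHasHash row
      · rw [pvF, if_neg (by rw [hhb]; exact Bool.false_ne_true), pvA_markRow_eq,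
          List.getElem?_map, List.getElem?_eq_getElem hi, Option.map_some,
          Bool.not_false, if_pos rfl]
      · rw [pvF, if_pos hhb, List.getElem?_eq_getElem hi, Bool.not_true,
          if_neg (show ¬(false : Bool) = true from Bool.false_ne_true)]
  · rw [List.getElem?_eq_none hi, Option.map_none,
      if_neg (show ¬(0 ≤ i ∧ i < 0 + (m.headD []).length ∧ pvE m i = false ∧
          i < (pvF row).length)
        from fun h => by rw [pvF_length] at h; omega),
      List.getElem?_eq_none (by rw [pvF_length]; omega)]

theorem pvA_total_eq (cosmic_map : List (List String)) :
    update_cosmic_map_py cosmic_map = update_cosmic_map_py_alt cosmic_map := by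
  have hW : ((cosmic_map.map pvF).headD []).length = (cosmic_map.headD []).length := by
    cases cosmic_map with
    | nil => rfl
    | cons r rs => simp [pvF_length]
  show pvA_colStep (cosmic_map.map pvF) 0 ((cosmic_map.map pvF).headD []).length
      = cosmic_map.map (fun row => row.zipIdx.map (fun p =>
          if (!(row.contains "#")) || (decide (p.2 < (cosmic_map.headD []).length) &&
              (((List.range (cosmic_map.headD []).length).map
                (fun c => cosmic_map.all (fun r => !(r.getD c "" == "#")))).getD p.2 false))
          then "X" else p.1))
  rw [hW, pvA_colStep_eq_map (pvE cosmic_map) _ 0 (cosmic_map.map pvF) (fun _ => rfl),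
    List.map_map]
  exact List.map_congr_left (fun row _ => pvRow_eq cosmic_map row)

-- ===== VERDICT (by name: the statement is the Claim_ definition above) =====
theorem update_cosmic_map_py_spec : Claim_equal_update_cosmic_map_py := by
  intro m _ _
  unfold Spec_update_cosmic_map_py
  exact pvA_total_eq m
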